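-- pv_equiv track=rewrite | github.com/embydextrous/Interview | matrix/11-distinctCommonElementsAllRowsMatrix.py | findDistinctCommonElements
-- ===== SOURCE A (Python) =====
-- def findDistinctCommonElements(m):
--     resultSet = set()
--     firstRowSet = None
--     for i in range(len(m)):
--         if i == 0:
--             firstRowSet = set(m[i])
--         else:
--             for key in m[i]:
--                 if key in firstRowSet:
--                     resultSet.add(key)
--             firstRowSet = resultSet
--             resultSet = set()
--     return firstRowSet
-- ===== SOURCE B (Python) =====
-- def findDistinctCommonElements(m):
--     if not m:
--         return None
--     return {k for k in m[-1] if all(k in row for row in m)}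
-- ===== Notes on version B (the rewrite author's own statement) =====
-- stated objective: simpler
-- what changed: Replaces the running-intersection loop (rebuild a set from each row filtered by the previous intersection) with a single comprehension over the last row that keeps each element iff every row contains it.
import Mathlib
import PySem

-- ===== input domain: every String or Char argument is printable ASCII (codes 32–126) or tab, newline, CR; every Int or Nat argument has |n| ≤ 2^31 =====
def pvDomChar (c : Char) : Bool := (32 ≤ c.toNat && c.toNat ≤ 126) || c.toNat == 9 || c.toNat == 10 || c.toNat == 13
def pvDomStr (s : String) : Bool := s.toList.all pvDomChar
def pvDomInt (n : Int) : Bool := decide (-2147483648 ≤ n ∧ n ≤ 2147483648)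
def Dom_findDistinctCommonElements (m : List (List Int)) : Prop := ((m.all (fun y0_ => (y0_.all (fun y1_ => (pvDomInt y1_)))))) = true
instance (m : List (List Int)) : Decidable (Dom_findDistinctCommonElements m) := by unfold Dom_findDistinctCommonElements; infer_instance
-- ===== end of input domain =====

-- B replaces A's running-intersection loop with a single filtering pass over the last row
-- (keep k iff every row contains it); objective: simpler, not faster.

-- ===== PORT A =====
-- one iteration of A's `for i in range(len(m))` loop; state = (resultSet, firstRowSet)
def pvBodyA (m : List (List Int)) (st : PySem.Set Int × Option (PySem.Set Int)) (i : Int) :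
    PySem.Set Int × Option (PySem.Set Int) :=
  if i == 0 then (st.1, some (PySem.Set.ofList (PySem.List.pyGetD m i [])))
  else
    match st.2 with
    | none => st   -- unreachable: i > 0 is visited only after i = 0 set firstRowSet
    | some frs =>
      let resultSet := (PySem.List.pyGetD m i []).foldl
        (fun (res : PySem.Set Int) key => if frs.contains key then PySem.Set.add res key else res)
        st.1
      (PySem.Set.empty, some resultSet)

def findDistinctCommonElements (m : List (List Int)) : Option (List Int) :=
  ((PySem.List.pyRange 0 (PySem.List.len m) 1).foldl (pvBodyA m)
    (PySem.Set.empty, none)).2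

-- ===== PORT B =====
def findDistinctCommonElements_alt (m : List (List Int)) : Option (List Int) :=
  if m = [] then none
  else
    some ((PySem.List.pyGetD m (-1) []).foldl
      (fun (s : PySem.Set Int) k =>
        if m.all (fun row => row.contains k) then PySem.Set.add s k else s)
      PySem.Set.empty)

-- ===== PRECONDITION & SPEC =====
def Spec_findDistinctCommonElements (m : List (List Int)) (out : Option (List Int)) : Prop := out = findDistinctCommonElements_alt m
instance (m : List (List Int)) (out : Option (List Int)) : Decidable (Spec_findDistinctCommonElements m out) := by unfold Spec_findDistinctCommonElements; infer_instance

-- ===== CLAIM (what is proved, stated in full; the proofs are below) =====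
def Claim_equal_findDistinctCommonElements : Prop := ∀ (m : List (List Int)), Dom_findDistinctCommonElements m → Spec_findDistinctCommonElements m (findDistinctCommonElements m)

-- ===== LEMMAS AND PROOFS =====

-- A's processing of one later row: rebuild the intersection from `row`, filtered by S
def pvStep (S : PySem.Set Int) (row : List Int) : PySem.Set Int :=
  row.foldl (fun res key => if S.contains key then PySem.Set.add res key else res) PySem.Set.empty

-- the filtered dedup-fold both sides reduce to
def pvFilterFold (p : Int → Bool) (L : List Int) (s0 : PySem.Set Int) : PySem.Set Int :=
  L.foldl (fun s k => if p k then PySem.Set.add s k else s) s0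

theorem pvStep_eq_filterFold (S : PySem.Set Int) (row : List Int) :
    pvStep S row = pvFilterFold (fun k => S.contains k) row PySem.Set.empty := rfl

theorem pvFilterFold_congr (p q : Int → Bool) (L : List Int) (s0 : PySem.Set Int)
    (h : ∀ k ∈ L, p k = q k) : pvFilterFold p L s0 = pvFilterFold q L s0 := by
  unfold pvFilterFold
  apply PySem.List.foldl_congr_mem'
  intro k hk acc
  rw [h k hk]

theorem pvMem_filterFold (p : Int → Bool) (L : List Int) (s0 : PySem.Set Int) (x : Int) :
    x ∈ pvFilterFold p L s0 ↔ x ∈ s0 ∨ (x ∈ L ∧ p x = true) := by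
  induction L generalizing s0 with
  | nil => simp [pvFilterFold]
  | cons a t ih =>
    simp only [pvFilterFold, List.foldl_cons] at ih ⊢
    rw [ih]
    by_cases hp : p a = true
    · rw [if_pos hp]
      constructor
      · rintro (h | ⟨h1, h2⟩)
        · rcases (PySem.Set.mem_add _ _ _).mp h with h | rfl
          · exact Or.inl h
          · exact Or.inr ⟨List.mem_cons_self .., hp⟩
        · exact Or.inr ⟨List.mem_cons_of_mem _ h1, h2⟩
      · rintro (h | ⟨h1, h2⟩)
        · exact Or.inl ((PySem.Set.mem_add _ _ _).mpr (Or.inl h))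
        · rcases List.mem_cons.mp h1 with rfl | h1
          · exact Or.inl ((PySem.Set.mem_add _ _ _).mpr (Or.inr rfl))
          · exact Or.inr ⟨h1, h2⟩
    · rw [if_neg hp]
      constructor
      · rintro (h | ⟨h1, h2⟩)
        · exact Or.inl h
        · exact Or.inr ⟨List.mem_cons_of_mem _ h1, h2⟩
      · rintro (h | ⟨h1, h2⟩)
        · exact Or.inl h
        · rcases List.mem_cons.mp h1 with rfl | h1
          · exact absurd h2 hp
          · exact Or.inr ⟨h1, h2⟩

-- A's tail loop over indices pre.length, pre.length+1, … equals a structural fold over rs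
theorem pvFoldA_shift (m : List (List Int)) :
    ∀ (rs pre : List (List Int)) (S : PySem.Set Int), m = pre ++ rs → pre ≠ [] →
      ((PySem.List.pyRange (pre.length : Int) (m.length : Int) 1).foldl (pvBodyA m)
        (PySem.Set.empty, some S)).2 = some (rs.foldl pvStep S) := by
  intro rs
  induction rs with
  | nil =>
    intro pre S hm _
    subst hm
    rw [PySem.List.pyRange_one_eq_nil (by simp)]
    rfl
  | cons row rs' ih =>
    intro pre S hm hpre
    subst hm
    have hlt : (pre.length : Int) < ((pre ++ row :: rs').length : Int) := by simp
    rw [PySem.List.pyRange_one_cons hlt, List.foldl_cons]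
    have hne0 : ((pre.length : Int) == 0) = false := by
      cases pre with
      | nil => exact absurd rfl hpre
      | cons h t => simp only [beq_eq_false_iff_ne, ne_eq, List.length_cons]; omega
    have hget : PySem.List.pyGetD (pre ++ row :: rs') ((pre.length : Nat) : Int) ([] : List Int)
        = row := by
      rw [PySem.List.pyGetD_natCast]
      simp [List.getD]
    have hbody : pvBodyA (pre ++ row :: rs') (PySem.Set.empty, some S) ((pre.length : Nat) : Int)
        = (PySem.Set.empty, some (pvStep S row)) := by
      simp only [pvBodyA, hne0, Bool.false_eq_true, if_false, hget]
      rfl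
    rw [hbody]
    have hcast : (pre.length : Int) + 1 = (((pre ++ [row]).length : Nat) : Int) := by simp
    rw [hcast]
    have := ih (pre ++ [row]) (pvStep S row) (by simp) (by simp)
    simpa using this

-- A on a nonempty matrix is the chain of pvStep over the tail, seeded with set(row0)
theorem pvA_eq_chain (r : List Int) (rs : List (List Int)) :
    findDistinctCommonElements (r :: rs) = some (rs.foldl pvStep (PySem.Set.ofList r)) := by
  unfold findDistinctCommonElements
  have h0 : (0 : Int) < ((r :: rs).length : Int) := by simp
  rw [PySem.List.len_eq, PySem.List.pyRange_one_cons h0, List.foldl_cons]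
  have hbody : pvBodyA (r :: rs) (PySem.Set.empty, none) 0
      = (PySem.Set.empty, some (PySem.Set.ofList r)) := by
    simp [pvBodyA, PySem.List.pyGetD_zero_cons]
  rw [hbody]
  have h1 : (0 : Int) + 1 = (([r].length : Nat) : Int) := by simp
  rw [h1]
  exact pvFoldA_shift (r :: rs) rs [r] (PySem.Set.ofList r) rfl (by simp)

-- the chain of running intersections equals the one-pass filter of the LAST row
theorem pvChain_eq_filter (rs : List (List Int)) :
    ∀ (r : List Int),
      rs.foldl pvStep (PySem.Set.ofList r)
        = pvFilterFold (fun k => (r :: rs).all (fun row => row.contains k))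
            (rs.getLastD r) PySem.Set.empty := by
  induction rs using List.reverseRecOn with
  | nil =>
    intro r
    simp only [List.foldl_nil, List.getLastD_nil]
    rw [PySem.Set.ofList_eq_foldl]
    unfold pvFilterFold
    apply PySem.List.foldl_congr_mem'
    intro x hx acc
    simp [hx]
  | append_singleton rs' L ih =>
    intro r
    rw [List.foldl_append, List.foldl_cons, List.foldl_nil, ih r, List.getLastD_concat,
      pvStep_eq_filterFold]
    apply pvFilterFold_congr
    intro k hk
    have hchar : k ∈ pvFilterFold (fun k => (r :: rs').all (fun row => row.contains k))
        (rs'.getLastD r) PySem.Set.empty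
        ↔ (k ∈ rs'.getLastD r ∧ (r :: rs').all (fun row => row.contains k) = true) := by
      rw [pvMem_filterFold]
      simp [PySem.Set.empty]
    have hlm : (r :: rs').all (fun row => row.contains k) = true → k ∈ rs'.getLastD r := by
      intro hall
      have hmem : rs'.getLastD r ∈ r :: rs' := List.getLastD_mem_cons
      have := List.all_eq_true.mp hall _ hmem
      simpa [List.contains_iff_mem] using this
    have hmem : (pvFilterFold (fun k => (r :: rs').all (fun row => row.contains k))
        (rs'.getLastD r) PySem.Set.empty).contains k
        = (r :: rs').all (fun row => row.contains k) := by
      rw [Bool.eq_iff_iff, PySem.Set.contains_iff, hchar]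
      constructor
      · rintro ⟨_, h⟩; exact h
      · intro h; exact ⟨hlm h, h⟩
    rw [hmem]
    have hkL : L.contains k = true := List.contains_iff_mem.mpr hk
    have hL1 : ([L].all (fun row => row.contains k)) = true := by simp [hk]
    have : (r :: (rs' ++ [L])).all (fun row => row.contains k)
        = (r :: rs').all (fun row => row.contains k) := by
      rw [show r :: (rs' ++ [L]) = (r :: rs') ++ [L] from rfl, List.all_append, hL1,
        Bool.and_true]
    rw [this]

-- ===== VERDICT (by name: the statement is the Claim_ definition above) =====
theorem findDistinctCommonElements_spec : Claim_equal_findDistinctCommonElements := by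
  intro m _
  unfold Spec_findDistinctCommonElements
  cases m with
  | nil =>
    simp [findDistinctCommonElements, findDistinctCommonElements_alt,
      PySem.List.pyRange_one_eq_nil]
  | cons r rs =>
    rw [pvA_eq_chain, pvChain_eq_filter]
    unfold findDistinctCommonElements_alt
    rw [if_neg (by simp), PySem.List.pyGetD_neg_ofNat (r :: rs) 1 [] (by simp) (by simp),
      ← List.getLast_eq_getElem, List.getLast_eq_getLastD]
    · rfl
    · exact List.cons_ne_nil r rs
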